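-- pv_equiv track=rewrite | github.com/Yubelo3/SearchEngineDataPreperation | migrate_db.py | calculate_max_tf
-- ===== SOURCE A (Python) =====
-- def calculate_max_tf(index_data):
--     max_tf_dict = {}
--     for entry in index_data:
--         for doc in entry[2]:
--             doc_id = doc["id"]
--             if doc["count"] > max_tf_dict.get(doc_id, 0):
--                 max_tf_dict[doc_id] = doc["count"]
--     return max_tf_dict
-- ===== SOURCE B (Python) =====
-- def calculate_max_tf(index_data):
--     # gather pass: group every positive count by its doc id
--     grouped = {}
--     for entry in index_data:
--         for doc in entry[2]:
--             count = doc["count"]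
--             if count > 0:
--                 grouped.setdefault(doc["id"], []).append(count)
--     # aggregate pass: one max per document
--     return {doc_id: max(counts) for doc_id, counts in grouped.items()}
-- ===== Notes on version B (the rewrite author's own statement) =====
-- stated objective: alternative
-- what changed: Replaces A's single running-max dict update with a two-pass group-then-aggregate: first gather every positive count per doc id into lists, then take max(counts) per id in a dict comprehension.
import Mathlib
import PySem

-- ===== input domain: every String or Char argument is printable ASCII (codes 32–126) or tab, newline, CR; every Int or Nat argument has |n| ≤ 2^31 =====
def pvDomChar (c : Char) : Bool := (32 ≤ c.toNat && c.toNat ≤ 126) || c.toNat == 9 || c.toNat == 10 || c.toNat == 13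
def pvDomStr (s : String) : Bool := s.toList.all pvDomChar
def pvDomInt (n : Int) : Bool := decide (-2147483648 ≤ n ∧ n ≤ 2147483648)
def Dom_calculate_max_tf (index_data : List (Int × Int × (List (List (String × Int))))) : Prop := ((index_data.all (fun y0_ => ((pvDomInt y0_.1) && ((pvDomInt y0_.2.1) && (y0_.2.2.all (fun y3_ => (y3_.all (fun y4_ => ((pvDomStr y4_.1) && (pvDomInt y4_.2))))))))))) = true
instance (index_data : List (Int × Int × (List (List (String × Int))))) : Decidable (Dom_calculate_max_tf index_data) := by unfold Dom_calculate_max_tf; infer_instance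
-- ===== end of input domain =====

-- B replaces A's running-max dict update by a gather-then-aggregate pass (group positive counts per id, then max per group); same cost, different decomposition.


-- ===== PORT A =====
-- doc["id"] / doc["count"]: Pre_ guarantees both keys are present, so the `.getD 0` default is never taken.
def calculate_max_tf (index_data : List (Int × Int × (List (List (String × Int))))) : List (Int × Int) :=
  (index_data.foldl (fun d entry =>
    entry.2.2.foldl (fun d doc =>
      let doc_id := ((PySem.Dict.ofList doc).get? "id").getD 0
      let cnt := ((PySem.Dict.ofList doc).get? "count").getD 0
      if PySem.Dict.getD d doc_id 0 < cnt then PySem.Dict.insert d doc_id cnt else d) d)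
    (PySem.Dict.empty : PySem.Dict Int Int)).items

-- ===== PORT B =====
-- gather pass: grouped.setdefault(id, []).append(count) ported as Dict.modify id [] (· ++ [count])
def calculate_max_tf_alt (index_data : List (Int × Int × (List (List (String × Int))))) : List (Int × Int) :=
  let grouped : PySem.Dict Int (List Int) :=
    index_data.foldl (fun g entry =>
      entry.2.2.foldl (fun g doc =>
        let cnt := ((PySem.Dict.ofList doc).get? "count").getD 0
        if 0 < cnt then
          PySem.Dict.modify g (((PySem.Dict.ofList doc).get? "id").getD 0) [] (fun l => l ++ [cnt])
        else g) g)
      PySem.Dict.empty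
  -- aggregate pass: {doc_id: max(counts)}; every stored list is nonempty, so max() never raises
  grouped.items.map (fun p => (p.1, (PySem.List.max? p.2 (fun x => x)).getD 0))

-- ===== PRECONDITION & SPEC =====
-- Pre_ excludes exactly the inputs where Python A raises KeyError: some doc dict lacking the key "id" or "count".
def Pre_calculate_max_tf (index_data : List (Int × Int × (List (List (String × Int))))) : Prop :=
  ∀ e ∈ index_data, ∀ doc ∈ e.2.2,
    (PySem.Dict.contains (PySem.Dict.ofList doc) "id") = true ∧
    (PySem.Dict.contains (PySem.Dict.ofList doc) "count") = true
instance (index_data : List (Int × Int × (List (List (String × Int))))) : Decidable (Pre_calculate_max_tf index_data) := by unfold Pre_calculate_max_tf; infer_instance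
def pvWitness_calculate_max_tf : (List (Int × Int × (List (List (String × Int))))) :=
  [(1, 2, [[("id", 3), ("count", 2)], [("id", 4), ("count", 0)]])]
def Spec_calculate_max_tf (index_data : List (Int × Int × (List (List (String × Int))))) (out : List (Int × Int)) : Prop := out = calculate_max_tf_alt index_data
instance (index_data : List (Int × Int × (List (List (String × Int))))) (out : List (Int × Int)) : Decidable (Spec_calculate_max_tf index_data out) := by unfold Spec_calculate_max_tf; infer_instance

-- ===== CLAIM (what is proved, stated in full; the proofs are below) =====
def Claim_equal_calculate_max_tf : Prop := ∀ (index_data : List (Int × Int × (List (List (String × Int))))), Dom_calculate_max_tf index_data → Pre_calculate_max_tf index_data → Spec_calculate_max_tf index_data (calculate_max_tf index_data)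

-- ===== LEMMAS AND PROOFS =====

def pvPair (doc : List (String × Int)) : Int × Int :=
  (((PySem.Dict.ofList doc).get? "id").getD 0, ((PySem.Dict.ofList doc).get? "count").getD 0)

def pvStepA (d : PySem.Dict Int Int) (p : Int × Int) : PySem.Dict Int Int :=
  if PySem.Dict.getD d p.1 0 < p.2 then PySem.Dict.insert d p.1 p.2 else d

theorem pvA_getD (ds : List (Int × Int)) (d : PySem.Dict Int Int) (k : Int) :
    PySem.Dict.getD (ds.foldl pvStepA d) k 0 =
      ((ds.filter (fun p => p.1 == k)).map (·.2)).foldl (fun a c => if a < c then c else a) (PySem.Dict.getD d k 0) := by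
  induction ds generalizing d with
  | nil => rfl
  | cons p t ih =>
    simp only [List.foldl_cons, ih, pvStepA]
    by_cases hk : p.1 = k
    · subst hk
      by_cases h : PySem.Dict.getD d p.1 0 < p.2
      · rw [if_pos h]
        rw [PySem.Dict.getD_insert_self]
        simp only [List.filter_cons, BEq.rfl, List.map_cons, List.foldl_cons, if_true]
        congr 1
        omega
      · rw [if_neg h]
        simp only [List.filter_cons, BEq.rfl, List.map_cons, List.foldl_cons, if_true]
        congr 1
        omega
    · have hne : k ≠ p.1 := fun hh => hk hh.symm
      by_cases h : PySem.Dict.getD d p.1 0 < p.2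
      · rw [if_pos h, PySem.Dict.getD_insert_of_ne _ _ _ hne]
        simp [hk]
      · rw [if_neg h]
        simp [hk]

theorem pvA_nodup (ds : List (Int × Int)) (d : PySem.Dict Int Int) (h : d.keys.Nodup) :
    (ds.foldl pvStepA d).keys.Nodup := by
  induction ds generalizing d with
  | nil => exact h
  | cons p t ih =>
    simp only [List.foldl_cons, pvStepA]
    split
    · exact ih _ (PySem.Dict.nodup_keys_insert _ _ _ h)
    · exact ih _ h

theorem pvA_keys (ds : List (Int × Int)) (d : PySem.Dict Int Int)
    (hpos : ∀ q ∈ d.items, 0 < q.2) :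
    (ds.foldl pvStepA d).keys = PySem.Set.update d.keys ((ds.filter (fun p => decide (0 < p.2))).map (·.1)) ∧
    (∀ q ∈ (ds.foldl pvStepA d).items, 0 < q.2) := by
  induction ds generalizing d with
  | nil => exact ⟨rfl, hpos⟩
  | cons p t ih =>
    simp only [List.foldl_cons, pvStepA]
    have hge : PySem.Dict.contains d p.1 = true → 0 < PySem.Dict.getD d p.1 0 := by
      intro hcon
      rcases hg : PySem.Dict.get? d p.1 with _ | v
      · rw [PySem.Dict.contains_eq_isSome_get?, hg] at hcon; simp at hcon
      · have hv := hpos _ (PySem.Dict.mem_items_of_get?_eq_some d hg)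
        rw [PySem.Dict.getD_of_get?_eq_some d 0 hg]
        exact hv
    by_cases h : PySem.Dict.getD d p.1 0 < p.2
    · rw [if_pos h]
      have hp2 : 0 < p.2 := by
        rcases hcon : PySem.Dict.contains d p.1 with _ | _
        · have := PySem.Dict.getD_of_not_contains d (0:Int) hcon
          omega
        · have := hge hcon; omega
      have hpos' : ∀ q ∈ (PySem.Dict.insert d p.1 p.2).items, 0 < q.2 := by
        intro q hq
        rcases (PySem.Dict.mem_items_insert d p.1 p.2 q).1 hq with hq | ⟨hq, _⟩
        · subst hq; exact hp2
        · exact hpos _ hq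
      obtain ⟨hk, hp⟩ := ih _ hpos'
      refine ⟨?_, hp⟩
      rw [hk]
      rw [List.filter_cons, if_pos (by simpa using hp2)]
      simp only [List.map_cons, PySem.Set.update, List.foldl_cons]
      congr 1
      -- (insert d p.1 p.2).keys = Set.add d.keys p.1
      rcases hcon : PySem.Dict.contains d p.1 with _ | _
      · rw [PySem.Dict.keys_insert_of_not_contains d p.2 hcon]
        have hm : p.1 ∉ d.keys := fun hm =>
          by rw [(PySem.Dict.contains_iff_mem_keys d p.1).2 hm] at hcon; cases hcon
        simp [PySem.Set.add, hm]
      · rw [PySem.Dict.keys_insert_of_contains d p.2 hcon]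
        have hm : p.1 ∈ d.keys := (PySem.Dict.contains_iff_mem_keys d p.1).1 hcon
        simp [PySem.Set.add, hm]
    · rw [if_neg h]
      obtain ⟨hk, hp⟩ := ih _ hpos
      refine ⟨?_, hp⟩
      rw [hk]
      by_cases hp2 : 0 < p.2
      · have hcon : PySem.Dict.contains d p.1 = true := by
          rcases hcon : PySem.Dict.contains d p.1 with _ | _
          · have := PySem.Dict.getD_of_not_contains d (0:Int) hcon
            omega
          · rfl
        have hm : p.1 ∈ d.keys := (PySem.Dict.contains_iff_mem_keys d p.1).1 hcon
        rw [List.filter_cons, if_pos (by simpa using hp2)]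
        simp only [List.map_cons, PySem.Set.update, List.foldl_cons]
        congr 1
        simp [PySem.Set.add, hm]
      · simp [hp2]

def pvStepB (g : PySem.Dict Int (List Int)) (p : Int × Int) : PySem.Dict Int (List Int) :=
  if 0 < p.2 then PySem.Dict.modify g p.1 [] (fun l => l ++ [p.2]) else g

-- running max written with `if` is foldl max
theorem pv_ifmax (cs : List Int) (a : Int) :
    cs.foldl (fun a c => if a < c then c else a) a = cs.foldl max a := by
  refine PySem.List.foldl_congr_mem _ _ _ _ (fun acc x _ => ?_)
  rcases le_or_gt x acc with h | h
  · simp [not_lt.2 h, max_eq_left h]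
  · simp [h, max_eq_right (le_of_lt h)]

theorem pv_foldl_max_filter (cs : List Int) (a : Int) (ha : 0 ≤ a) :
    cs.foldl max a = (cs.filter (fun c => decide (0 < c))).foldl max a := by
  induction cs generalizing a with
  | nil => rfl
  | cons c t ih =>
    by_cases h : 0 < c
    · rw [List.filter_cons, if_pos (by simpa using h)]
      simp only [List.foldl_cons]
      exact ih _ (by omega)
    · rw [List.filter_cons, if_neg (by simpa using h)]
      simp only [List.foldl_cons]
      rw [max_eq_left (by omega)]
      exact ih _ ha

theorem pv_maxval (cs : List Int) (h : cs.filter (fun c => decide (0 < c)) ≠ []) :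
    cs.foldl (fun a c => if a < c then c else a) 0 =
      (PySem.List.max? (cs.filter (fun c => decide (0 < c))) (fun x => x)).getD 0 := by
  rw [pv_ifmax, pv_foldl_max_filter cs 0 le_rfl]
  rcases hf : cs.filter (fun c => decide (0 < c)) with _ | ⟨x, t⟩
  · exact absurd hf h
  · have hx : 0 < x := by
      have : x ∈ cs.filter (fun c => decide (0 < c)) := by rw [hf]; exact List.mem_cons_self
      simpa using (List.of_mem_filter this)
    rw [PySem.List.max?_id_cons, Option.getD_some, List.foldl_cons, max_eq_right (by omega)]

-- flattening the nested entry/doc loop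
theorem pv_flat {δ : Type} (l : List (Int × Int × (List (List (String × Int))))) (f : δ → List (String × Int) → δ) (init : δ) :
    l.foldl (fun d e => e.2.2.foldl f d) init = (l.flatMap (·.2.2)).foldl f init := by
  induction l generalizing init <;> simp [List.foldl_append, *]

theorem pv_main (index_data : List (Int × Int × (List (List (String × Int))))) :
    calculate_max_tf index_data = calculate_max_tf_alt index_data := by
  have hA : calculate_max_tf index_data =
      (((index_data.flatMap (·.2.2)).map pvPair).foldl pvStepA PySem.Dict.empty).items := by
    unfold calculate_max_tf
    rw [pv_flat, List.foldl_map]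
    rfl
  have hB : calculate_max_tf_alt index_data =
      (((index_data.flatMap (·.2.2)).map pvPair).foldl pvStepB PySem.Dict.empty).items.map
        (fun p => (p.1, (PySem.List.max? p.2 (fun x => x)).getD 0)) := by
    unfold calculate_max_tf_alt
    rw [pv_flat, List.foldl_map]
    rfl
  set ds := (index_data.flatMap (·.2.2)).map pvPair with hds
  set pos := ds.filter (fun p => decide (0 < p.2)) with hpos
  have hBfold : ds.foldl pvStepB PySem.Dict.empty =
      pos.foldl (fun g p => PySem.Dict.modify g p.1 [] (fun l => l ++ [p.2])) PySem.Dict.empty :=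
    PySem.List.foldl_ite_eq_foldl_filter (fun p : Int × Int => 0 < p.2)
      (fun g p => PySem.Dict.modify g p.1 [] (fun l => l ++ [p.2])) ds PySem.Dict.empty
  have hBkeys : (pos.foldl (fun g p => PySem.Dict.modify g p.1 [] (fun l => l ++ [p.2]))
      (PySem.Dict.empty : PySem.Dict Int (List Int))).keys = PySem.Set.ofList (pos.map (·.1)) := by
    rw [PySem.Dict.keys_foldl_modify_key pos Prod.fst [] (fun d x => fun l => l ++ [x.2]) PySem.Dict.empty]
    rw [PySem.Dict.keys_empty, PySem.Set.ofList_eq_foldl]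
    rfl
  have hBnodup : (pos.foldl (fun g p => PySem.Dict.modify g p.1 [] (fun l => l ++ [p.2]))
      (PySem.Dict.empty : PySem.Dict Int (List Int))).keys.Nodup :=
    PySem.Dict.nodup_keys_foldl_modify_key pos Prod.fst [] (fun d x => fun l => l ++ [x.2])
      PySem.Dict.empty (by rw [PySem.Dict.keys_empty]; exact List.nodup_nil)
  have hemptyitems : ∀ q ∈ (PySem.Dict.empty : PySem.Dict Int Int).items, (0:Int) < q.2 := by
    intro q hq
    simp [PySem.Dict.empty] at hq
  have hAkeys := (pvA_keys ds PySem.Dict.empty hemptyitems).1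
  have hAkeys' : (ds.foldl pvStepA PySem.Dict.empty).keys = PySem.Set.ofList (pos.map (·.1)) := by
    rw [hAkeys, PySem.Dict.keys_empty, PySem.Set.ofList_eq_foldl]
    rfl
  have hAnodup : (ds.foldl pvStepA PySem.Dict.empty).keys.Nodup :=
    pvA_nodup ds PySem.Dict.empty (by rw [PySem.Dict.keys_empty]; exact List.nodup_nil)
  rw [hA, hB, hBfold]
  rw [PySem.Dict.items_eq_map_keys _ hAnodup 0, PySem.Dict.items_eq_map_keys _ hBnodup []]
  rw [hAkeys', hBkeys, List.map_map]
  refine List.map_congr_left (fun k hk => ?_)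
  have hkmem : k ∈ pos.map (·.1) := (PySem.Set.mem_ofList _ _).1 hk
  obtain ⟨p, hpmem, hpk⟩ := List.mem_map.1 hkmem
  -- the grouped list at k
  have hgetB : (pos.foldl (fun g p => PySem.Dict.modify g p.1 [] (fun l => l ++ [p.2]))
      (PySem.Dict.empty : PySem.Dict Int (List Int))).getD k [] =
      (pos.filter (fun p => p.1 == k)).map (·.2) := by
    rw [PySem.Dict.getD_foldl_modify_append pos PySem.Dict.empty k, PySem.Dict.getD_empty]
    simp
  have hfilters : ((ds.filter (fun p => p.1 == k)).map (·.2)).filter (fun c => decide (0 < c)) =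
      (pos.filter (fun p => p.1 == k)).map (·.2) := by
    rw [List.filter_map, hpos, List.filter_filter, List.filter_filter]
    congr 1
    refine List.filter_congr (fun q _ => ?_)
    simp only [Function.comp]
    exact Bool.and_comm _ _
  have hne : ((ds.filter (fun p => p.1 == k)).map (·.2)).filter (fun c => decide (0 < c)) ≠ [] := by
    rw [hfilters]
    have : p ∈ pos.filter (fun p => p.1 == k) :=
      List.mem_filter.2 ⟨hpmem, by simp [hpk]⟩
    intro hcontra
    rw [List.eq_nil_iff_forall_not_mem] at hcontra
    exact hcontra _ (List.mem_map_of_mem this)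
  simp only [Function.comp]
  rw [hgetB, pvA_getD ds PySem.Dict.empty k, PySem.Dict.getD_empty, pv_maxval _ hne, hfilters]

-- ===== VERDICT (by name: the statement is the Claim_ definition above) =====
theorem calculate_max_tf_spec : Claim_equal_calculate_max_tf := by
  intro index_data _ _
  show calculate_max_tf index_data = calculate_max_tf_alt index_data
  exact pv_main index_data
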